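-- pv_equiv track=rewrite | github.com/MrBrantCode/unitest_baseline | mut_generate/mist_train_cf/cf_57332/solution.py | hybrid_sort_list_heap
-- ===== SOURCE A (Python) =====
-- import heapq
-- import bisect
--
-- def hybrid_sort_list_heap(lst):
--     heapq.heapify(lst)
--
--     if len(lst) < 10:
--         sorted_lst = binary_insertion_sort(lst)
--     else:
--         sorted_lst = [heapq.heappop(lst) for _ in range(len(lst))]
--
--     result = []
--     while sorted_lst:
--         result.append(sorted_lst.pop(0))
--         if sorted_lst:
--             result.append(sorted_lst.pop(-1))
--
--     return result
--
-- def binary_insertion_sort(arr):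
--     for i in range(1, len(arr)):
--         bisect.insort(arr, arr.pop(i), 0, i)
--     return arr
-- ===== SOURCE B (Python) =====
-- def hybrid_sort_list_heap(lst):
--     # Return-value equivalent: sorted() then two-pointer interleave from both ends.
--     # (A mutates lst in place; B does not -- equivalence is about the return value.)
--     s = sorted(lst)
--     res = []
--     i, j = 0, len(s) - 1
--     while i < j:
--         res.append(s[i])
--         res.append(s[j])
--         i += 1
--         j -= 1
--     if i == j:
--         res.append(s[i])
--     return res
-- ===== Notes on version B (the rewrite author's own statement) =====
-- stated objective: faster
-- what changed: Replaces heapify + (heappop-loop or binary insertion sort) followed by a quadratic pop(0)/pop(-1) interleaving loop with a single sorted() call and a two-pointer interleave that indexes the sorted list from both ends.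
import Mathlib
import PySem

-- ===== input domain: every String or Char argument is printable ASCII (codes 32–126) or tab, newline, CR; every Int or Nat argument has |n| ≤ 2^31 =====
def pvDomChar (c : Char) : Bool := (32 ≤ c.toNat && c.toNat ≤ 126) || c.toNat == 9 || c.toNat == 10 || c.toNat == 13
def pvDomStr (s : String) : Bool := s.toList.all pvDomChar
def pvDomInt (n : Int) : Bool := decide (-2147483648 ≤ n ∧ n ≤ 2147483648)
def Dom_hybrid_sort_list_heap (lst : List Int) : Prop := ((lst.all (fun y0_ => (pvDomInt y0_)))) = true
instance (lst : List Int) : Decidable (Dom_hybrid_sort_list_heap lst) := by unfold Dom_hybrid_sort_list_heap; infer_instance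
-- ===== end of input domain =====

-- B replaces A's heapify/heappop + insertion-sort machinery and the quadratic pop(0)/pop(-1)
-- interleaving by sorted() plus a two-pointer interleave (objective: faster).  A mutates `lst`
-- in place (heapify / pops empty it); B does not — the equivalence proved is about the return value.

-- ===== PORT A =====

/-- the while-loop of CPython `_siftdown(heap, startpos, pos)` (bubble `newitem` up);
    the final write `heap[pos] = newitem` is done by the caller `pvSiftdown`. -/
def pvSiftdownLoop (h : List Int) (startpos pos : Nat) (newitem : Int) : List Int × Nat :=
  if startpos < pos then
    -- parentpos = (pos - 1) >> 1 (pos ≥ 1 here); parent = heap[parentpos]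
    if newitem < h.getD ((pos - 1) / 2) 0 then
      pvSiftdownLoop (h.set pos (h.getD ((pos - 1) / 2) 0)) startpos ((pos - 1) / 2) newitem
    else (h, pos)
  else (h, pos)
termination_by pos
decreasing_by omega

/-- CPython `_siftdown(heap, startpos, pos)`. -/
def pvSiftdown (h : List Int) (startpos pos : Nat) : List Int :=
  let newitem := h.getD pos 0
  let r := pvSiftdownLoop h startpos pos newitem
  r.1.set r.2 newitem

-- the while-loop of CPython `_siftup(heap, pos)` moves the hole down to a leaf along the
-- smaller-child path (right child preferred on ties, as in CPython):
/-- childpos after the CPython right-child preference test. -/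
def pvChildSel (h : List Int) (pos endpos : Nat) : Nat :=
  if 2*pos+2 < endpos ∧ ¬ (h.getD (2*pos+1) 0 < h.getD (2*pos+2) 0) then 2*pos+2 else 2*pos+1

theorem pvChildSel_lt (h : List Int) (pos endpos : Nat) (hg : 2*pos+1 < endpos) :
    pos < pvChildSel h pos endpos ∧ pvChildSel h pos endpos < endpos := by
  unfold pvChildSel; split <;> omega

def pvSiftupLoop (h : List Int) (pos endpos : Nat) : List Int × Nat :=
  if 2*pos+1 < endpos then
    pvSiftupLoop (h.set pos (h.getD (pvChildSel h pos endpos) 0)) (pvChildSel h pos endpos) endpos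
  else (h, pos)
termination_by endpos - pos
decreasing_by exact Nat.sub_lt_sub_left (by omega) (pvChildSel_lt h pos endpos (by omega)).1

/-- CPython `_siftup(heap, pos)`: dig to a leaf, place `newitem`, then `_siftdown`. -/
def pvSiftup (h : List Int) (pos : Nat) : List Int :=
  let newitem := h.getD pos 0
  let r := pvSiftupLoop h pos h.length
  pvSiftdown (r.1.set r.2 newitem) pos r.2

/-- `heapq.heapify(lst)`: `for i in reversed(range(n//2)): _siftup(lst, i)`. -/
def pvHeapify (lst : List Int) : List Int :=
  ((List.range (lst.length / 2)).reverse).foldl (fun h i => pvSiftup h i) lst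

/-- `heapq.heappop(heap)`; the heap is nonempty at every call site of A. -/
def pvHeappop (h : List Int) : Int × List Int :=
  let lastelt := h.getLast?.getD 0       -- heap.pop()
  let rest := h.dropLast
  if rest.isEmpty then (lastelt, rest)
  else (rest.getD 0 0, pvSiftup (rest.set 0 lastelt) 0)

/-- `[heapq.heappop(lst) for _ in range(len(lst))]` (`len` read once). -/
def pvPops (h : List Int) : Nat → List Int
  | 0 => []
  | n+1 => (pvHeappop h).1 :: pvPops (pvHeappop h).2 n

/-- one step `bisect.insort(arr, arr.pop(i), 0, i)`
    (insort with `hi = i` = bisect_right among the first `i` elements). -/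
def pvBisStep (arr : List Int) (i : Nat) : List Int :=
  let p := (PySem.List.pop? arr (i : Int)).getD (0, arr)
  PySem.List.insert p.2 ((PySem.List.bisectRight (p.2.take i) p.1 : Nat) : Int) p.1

/-- `binary_insertion_sort(arr)`: `for i in range(1, len(arr)): bisect.insort(arr, arr.pop(i), 0, i)`. -/
def pvBinaryInsertionSort (arr : List Int) : List Int :=
  (List.range' 1 (arr.length - 1)).foldl pvBisStep arr   -- range(1, len(arr))

/-- the `while sorted_lst:` loop: pop the front, then (if nonempty) the back. -/
def pvInterleave (s res : List Int) : List Int :=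
  match s with
  | [] => res
  | x :: rest =>
    if rest.isEmpty then res ++ [x]
    else pvInterleave rest.dropLast ((res ++ [x]) ++ [rest.getLast?.getD 0])
termination_by s.length
decreasing_by simp only [List.length_cons, List.length_dropLast]; omega

def hybrid_sort_list_heap (lst : List Int) : List Int :=
  let h := pvHeapify lst
  let sorted_lst := if h.length < 10 then pvBinaryInsertionSort h else pvPops h h.length
  pvInterleave sorted_lst []

-- ===== PORT B =====

/-- Source B's `while i < j` two-pointer loop plus the final `if i == j`. -/
def pvTwoPtr (s res : List Int) (i j : Int) : List Int :=
  if i < j then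
    pvTwoPtr s ((res ++ [PySem.List.pyGetD s i 0]) ++ [PySem.List.pyGetD s j 0]) (i+1) (j-1)
  else if i = j then res ++ [PySem.List.pyGetD s i 0]
  else res
termination_by (j + 1 - i).toNat
decreasing_by omega

def hybrid_sort_list_heap_alt (lst : List Int) : List Int :=
  let s := PySem.List.sorted lst (fun x => x)
  pvTwoPtr s [] 0 (PySem.List.len s - 1)

-- ===== PRECONDITION & SPEC =====
def Spec_hybrid_sort_list_heap (lst : List Int) (out : List Int) : Prop := out = hybrid_sort_list_heap_alt lst
instance (lst : List Int) (out : List Int) : Decidable (Spec_hybrid_sort_list_heap lst out) := by unfold Spec_hybrid_sort_list_heap; infer_instance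

-- ===== CLAIM (what is proved, stated in full; the proofs are below) =====
def Claim_equal_hybrid_sort_list_heap : Prop := ∀ (lst : List Int), Dom_hybrid_sort_list_heap lst → Spec_hybrid_sort_list_heap lst (hybrid_sort_list_heap lst)

-- ===== LEMMAS AND PROOFS =====

/-- the common interleaving of a sorted list: front, back, front, back, … -/
def pvWeave : List Int → List Int
  | [] => []
  | x :: rest =>
    if rest.isEmpty then [x]
    else x :: rest.getLast?.getD 0 :: pvWeave rest.dropLast
termination_by s => s.length
decreasing_by simp only [List.length_cons, List.length_dropLast]; omega

theorem pvInterleave_eq_weave : ∀ (n : Nat) (s res : List Int), s.length ≤ n →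
    pvInterleave s res = res ++ pvWeave s := by
  intro n
  induction n with
  | zero =>
    intro s res h
    have hs : s = [] := List.length_eq_zero_iff.mp (by omega)
    subst hs; rw [pvInterleave, pvWeave]; simp
  | succ n ih =>
    intro s res h
    match s with
    | [] => rw [pvInterleave, pvWeave]; simp
    | x :: rest =>
      rw [pvInterleave, pvWeave]
      by_cases hre : rest.isEmpty
      · simp [hre]
      · simp only [hre]
        rw [ih rest.dropLast _ (by simp at h ⊢; omega)]
        simp

theorem pvTwoPtr_eq_weave : ∀ (n : Nat) (s res : List Int) (i j : Int),
    (j + 1 - i).toNat ≤ n → 0 ≤ i → i ≤ j + 1 → j < (s.length : Int) →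
    pvTwoPtr s res i j = res ++ pvWeave ((s.drop i.toNat).take (j + 1 - i).toNat) := by
  intro n
  induction n with
  | zero =>
    intro s res i j hn h0 hij hj
    have : i = j + 1 := by omega
    subst this
    rw [pvTwoPtr]
    have h1 : (j + 1 - (j+1)).toNat = 0 := by omega
    rw [h1]
    simp [pvWeave, show ¬ (j+1 < j) by omega, show ¬ (j+1 = j) by omega]
  | succ n ih =>
    intro s res i j hn h0 hij hj
    set a := i.toNat with ha
    by_cases hlt : i < j
    · have hjlen : j.toNat < s.length := by omega
      have hilen : a < s.length := by omega
      have hb2 : 2 ≤ (j + 1 - i).toNat := by omega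
      rw [pvTwoPtr, if_pos hlt]
      rw [ih s ((res ++ [PySem.List.pyGetD s i 0]) ++ [PySem.List.pyGetD s j 0]) (i+1) (j-1)
          (by omega) (by omega) (by omega) (by omega)]
      have hdrop : s.drop a = s[a] :: s.drop (a+1) := List.drop_eq_getElem_cons hilen
      have hseg : (s.drop a).take (j + 1 - i).toNat
          = s[a] :: (s.drop (a+1)).take ((j+1-i).toNat - 1) := by
        rw [hdrop, List.take_cons (by omega)]
      set rest := (s.drop (a+1)).take ((j+1-i).toNat - 1) with hrest
      have hrestlen : rest.length = (j+1-i).toNat - 1 := by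
        simp [hrest, List.length_take, List.length_drop]; omega
      have hrest_ne : rest.isEmpty = false := by
        rw [List.isEmpty_eq_false_iff, ← List.length_pos_iff]; omega
      have hweave : pvWeave ((s.drop a).take (j + 1 - i).toNat)
          = s[a] :: rest.getLast?.getD 0 :: pvWeave rest.dropLast := by
        rw [hseg, pvWeave, hrest_ne]; simp
      have hlast : rest.getLast?.getD 0 = s[j.toNat] := by
        have h1 : rest.length - 1 < rest.length := by omega
        rw [List.getLast?_eq_getElem?, List.getElem?_eq_getElem h1]
        simp only [Option.getD_some, hrest, List.getElem_take, List.getElem_drop]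
        congr 1
        simp only [List.length_take, List.length_drop]
        omega
      have hdl : rest.dropLast = (s.drop ((i+1).toNat)).take ((j-1) + 1 - (i+1)).toNat := by
        rw [List.dropLast_eq_take, hrestlen, hrest, List.take_take]
        congr 1
        · omega
        · congr 1; omega
      rw [hweave, hlast, hdl]
      rw [PySem.List.pyGetD_eq_getElem s 0 h0 (by omega),
          PySem.List.pyGetD_eq_getElem s 0 (by omega) (by omega)]
      simp
      rfl
    · by_cases heq : i = j
      · subst heq
        rw [pvTwoPtr, if_neg (by omega), if_pos rfl]
        have h1 : (i + 1 - i).toNat = 1 := by omega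
        rw [h1]
        have hilen : a < s.length := by omega
        have hdrop : s.drop a = s[a] :: s.drop (a+1) := List.drop_eq_getElem_cons hilen
        rw [hdrop, List.take_cons (by omega)]
        simp [pvWeave]
        rw [PySem.List.pyGetD_eq_getElem s 0 h0 (by simpa using hj)]
      · have : i = j + 1 := by omega
        subst this
        rw [pvTwoPtr]
        have h1 : (j + 1 - (j+1)).toNat = 0 := by omega
        rw [h1]
        simp [pvWeave, show ¬ (j+1 < j) by omega, show ¬ (j+1 = j) by omega]

-- heap machinery -------------------------------------------------------------

/-- heap property at all parents `q ≥ k`, ignoring every relation that touches the hole `p`. -/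
def HoleHeap (h : List Int) (k p : Nat) : Prop :=
  ∀ q c, k ≤ q → c < h.length → (c = 2*q+1 ∨ c = 2*q+2) → q ≠ p → c ≠ p →
    h.getD q 0 ≤ h.getD c 0

/-- heap property at all parents `q ≥ k`. -/
def IsHeapFrom (h : List Int) (k : Nat) : Prop :=
  ∀ q c, k ≤ q → c < h.length → (c = 2*q+1 ∨ c = 2*q+2) → h.getD q 0 ≤ h.getD c 0

/-- `p` lies in the subtree rooted at `k`. -/
def pvDesc (k p : Nat) : Bool :=
  if p = k then true
  else if p = 0 then false
  else pvDesc k ((p - 1) / 2)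
termination_by p
decreasing_by omega

theorem pvDesc_le {k p : Nat} (h : pvDesc k p = true) : k ≤ p := by
  induction p using Nat.strong_induction_on with
  | _ p ih =>
    rw [pvDesc] at h
    split at h
    · omega
    · split at h
      · simp at h
      · have := ih ((p-1)/2) (by omega) h; omega

theorem pvDesc_parent {k p : Nat} (h : pvDesc k p = true) (hne : p ≠ k) :
    pvDesc k ((p - 1) / 2) = true := by
  rw [pvDesc] at h
  split at h
  · omega
  · split at h
    · simp at h
    · exact h

theorem pvDesc_child {k p c : Nat} (h : pvDesc k p = true) (hc : c = 2*p+1 ∨ c = 2*p+2) :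
    pvDesc k c = true := by
  have hk := pvDesc_le h
  have hpc : (c - 1) / 2 = p := by omega
  rw [pvDesc]
  split
  · rfl
  · split
    · omega
    · rw [hpc]; exact h

theorem getD_set_self (l : List Int) (i : Nat) (hi : i < l.length) (v : Int) :
    (l.set i v).getD i 0 = v := by
  simp [List.getD_eq_getElem?_getD, hi]

theorem getD_set_ne (l : List Int) (i j : Nat) (v : Int) (hij : i ≠ j) :
    (l.set i v).getD j 0 = l.getD j 0 := by
  simp [List.getD_eq_getElem?_getD, List.getElem?_set_ne, hij]

theorem getD_of_lt (l : List Int) (i : Nat) (hi : i < l.length) : l.getD i 0 = l[i] := by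
  rw [List.getD_eq_getElem?_getD, List.getElem?_eq_getElem hi]; rfl

theorem cons_set_perm (P : List Int) : ∀ (i : Nat) (x y : Int), i < P.length →
    (x :: P.set i y).Perm (y :: P.set i x) := by
  induction P with
  | nil => intro i x y h; simp at h
  | cons a t ih =>
    intro i x y h
    cases i with
    | zero => simp only [List.set_cons_zero]; exact List.Perm.swap _ _ _
    | succ m =>
      simp only [List.set_cons_succ]
      exact ((List.Perm.swap _ _ _).trans ((ih m x y (by simpa using h)).cons a)).trans
        (List.Perm.swap _ _ _)

theorem set_set_perm (l : List Int) : ∀ (i j : Nat), i < l.length → j < l.length →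
    i ≠ j → ∀ (x : Int), ((l.set i (l.getD j 0)).set j x).Perm (l.set i x) := by
  induction l with
  | nil => intro i j hi; simp at hi
  | cons a t ih =>
    intro i j hi hj hij x
    cases i with
    | zero =>
      cases j with
      | zero => omega
      | succ n =>
        simp only [List.set_cons_zero, List.set_cons_succ, List.getD_cons_succ]
        have h1 := cons_set_perm t n x (t.getD n 0) (by simpa using hj)
        have h2 : t.set n (t.getD n 0) = t := by
          rw [getD_of_lt t n (by simpa using hj)]
          exact List.set_getElem_self (by simpa using hj)
        rw [h2] at h1
        exact h1.symm
    | succ m =>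
      cases j with
      | zero =>
        simp only [List.set_cons_succ, List.getD_cons_zero, List.set_cons_zero]
        exact cons_set_perm t m x a (by simpa using hi)
      | succ n =>
        simp only [List.set_cons_succ, List.getD_cons_succ]
        exact (ih m n (by simpa using hi) (by simpa using hj) (by omega) x).cons a

/-- dig phase: from a hole-heap state, `pvSiftupLoop` moves the hole down to a leaf of the
    subtree, keeping the hole-heap shape and permuting only hole contents. -/
theorem siftupLoop_spec (k : Nat) : ∀ (m : Nat) (h : List Int) (p e : Nat),
    e = h.length → e - p ≤ m → p < e → pvDesc k p = true → HoleHeap h k p →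
    (k < p → ∀ c, c < e → (c = 2*p+1 ∨ c = 2*p+2) → h.getD ((p-1)/2) 0 ≤ h.getD c 0) →
    ∃ h1 p1, pvSiftupLoop h p e = (h1, p1) ∧ h1.length = e ∧ p1 < e ∧ pvDesc k p1 = true ∧
      e ≤ 2*p1+1 ∧ (∀ x, (h1.set p1 x).Perm (h.set p x)) ∧ HoleHeap h1 k p1 ∧
      (k < p1 → ∀ c, c < e → (c = 2*p1+1 ∨ c = 2*p1+2) →
        h1.getD ((p1-1)/2) 0 ≤ h1.getD c 0) := by
  intro m
  induction m with
  | zero => intro h p e he hm hp; omega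
  | succ m ih =>
    intro h p e he hm hp hdesc hh hgp
    rw [pvSiftupLoop]
    by_cases hguard : 2*p+1 < e
    · rw [if_pos hguard]
      set c := pvChildSel h p e with hc
      have hcor : c = 2*p+1 ∨ c = 2*p+2 := by
        rw [hc]; unfold pvChildSel; split
        · right; rfl
        · left; rfl
      obtain ⟨hpc, hce⟩ := pvChildSel_lt h p e hguard
      rw [← hc] at hpc hce
      have hmin : ∀ c2, c2 < e → (c2 = 2*p+1 ∨ c2 = 2*p+2) → h.getD c 0 ≤ h.getD c2 0 := by
        intro c2 hc2 hor
        rw [hc]; unfold pvChildSel; split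
        · next hcond =>
          rcases hor with h1 | h1 <;> subst h1
          · omega
          · exact le_refl _
        · next hcond =>
          rcases hor with h1 | h1 <;> subst h1
          · exact le_refl _
          · have : h.getD (2*p+1) 0 < h.getD (2*p+2) 0 := by
              by_contra hcl
              exact hcond ⟨hc2, hcl⟩
            omega
      have hkp := pvDesc_le hdesc
      have hkc : k ≤ c := by omega
      have hple : p < h.length := by omega
      have hclh : c < h.length := by omega
      have hdesc' := pvDesc_child hdesc hcor
      have hh' : HoleHeap (h.set p (h.getD c 0)) k c := by
        intro q c2 hq hc2len hch hqne hcne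
        have hc2h : c2 < h.length := by simpa using hc2len
        by_cases hqp : q = p
        · subst hqp
          rw [getD_set_self h q hple, getD_set_ne h q c2 _ (by omega)]
          exact hmin c2 (by omega) hch
        · by_cases hc2p : c2 = p
          · subst hc2p
            have hqpar : q = (c2-1)/2 := by omega
            by_cases hpk : c2 = k
            · omega
            · have hklt : k < c2 := by omega
              rw [getD_set_ne h c2 q _ (by omega), getD_set_self h c2 hple]
              have := hgp hklt c (by omega) hcor
              rw [hqpar]
              exact this
          · rw [getD_set_ne h p q _ (by omega), getD_set_ne h p c2 _ (by omega)]
            exact hh q c2 hq hc2h hch hqp hc2p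
      have hgp' : k < c → ∀ c2, c2 < e → (c2 = 2*c+1 ∨ c2 = 2*c+2) →
          (h.set p (h.getD c 0)).getD ((c-1)/2) 0 ≤ (h.set p (h.getD c 0)).getD c2 0 := by
        intro _ c2 hc2e hch2
        have hparc : (c-1)/2 = p := by omega
        rw [hparc, getD_set_self h p hple, getD_set_ne h p c2 _ (by omega)]
        exact hh c c2 hkc (by omega) hch2 (by omega) (by omega)
      obtain ⟨h1, p1, heq, hlen1, hp1, hd1, hleaf1, hperm1, hh1, hgp1⟩ :=
        ih (h.set p (h.getD c 0)) c e (by simpa using he) (by omega) hce hdesc' hh' hgp'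
      exact ⟨h1, p1, heq, hlen1, hp1, hd1, hleaf1,
        fun x => (hperm1 x).trans (set_set_perm h p c hple hclh (by omega) x), hh1, hgp1⟩
    · rw [if_neg hguard]
      exact ⟨h, p, rfl, he.symm, hp, hdesc, by omega, fun x => List.Perm.refl _, hh, hgp⟩

/-- bubble phase: from a hole-heap state with the `newitem` side conditions, the loop plus the
    final write produce a heap from `k`. -/
theorem siftdownLoop_spec (k : Nat) (newitem : Int) : ∀ (m : Nat) (h : List Int) (p : Nat),
    p ≤ m → p < h.length → pvDesc k p = true → HoleHeap h k p →
    (∀ c, c < h.length → (c = 2*p+1 ∨ c = 2*p+2) → newitem ≤ h.getD c 0) →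
    (k < p → ∀ c, c < h.length → (c = 2*p+1 ∨ c = 2*p+2) →
      h.getD ((p-1)/2) 0 ≤ h.getD c 0) →
    ∃ h1 p1, pvSiftdownLoop h k p newitem = (h1, p1) ∧ h1.length = h.length ∧ p1 < h.length ∧
      (∀ x, (h1.set p1 x).Perm (h.set p x)) ∧ IsHeapFrom (h1.set p1 newitem) k := by
  intro m
  induction m with
  | zero =>
    intro h p hm hp hdesc hh hni hgp
    have hpk : p = k := by have := pvDesc_le hdesc; omega
    subst hpk
    rw [pvSiftdownLoop, if_neg (by omega)]
    refine ⟨h, p, rfl, rfl, hp, fun x => List.Perm.refl _, ?_⟩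
    intro q c2 hq hc2len hch
    have hc2h : c2 < h.length := by simpa using hc2len
    by_cases hqp : q = p
    · subst hqp
      rw [getD_set_self h q hp, getD_set_ne h q c2 _ (by omega)]
      exact hni c2 hc2h hch
    · have hc2p : c2 ≠ p := by omega
      rw [getD_set_ne h p q _ (by omega), getD_set_ne h p c2 _ (by omega)]
      exact hh q c2 hq hc2h hch hqp hc2p
  | succ m ih =>
    intro h p hm hp hdesc hh hni hgp
    rw [pvSiftdownLoop]
    have hkp := pvDesc_le hdesc
    by_cases hguard : k < p
    · rw [if_pos hguard]
      by_cases hmove : newitem < h.getD ((p - 1) / 2) 0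
      · rw [if_pos hmove]
        set p' := (p - 1) / 2 with hp'
        have hpp' : p' < p := by omega
        have hp'h : p' < h.length := by omega
        have hdesc' : pvDesc k p' = true := pvDesc_parent hdesc (by omega)
        have hkp' : k ≤ p' := pvDesc_le hdesc'
        have hgpc := hgp hguard
        have hh' : HoleHeap (h.set p (h.getD p' 0)) k p' := by
          intro q c2 hq hc2len hch hqne hcne
          have hc2h : c2 < h.length := by simpa using hc2len
          by_cases hqp : q = p
          · subst hqp
            rw [getD_set_self h q hp, getD_set_ne h q c2 _ (by omega)]
            exact hgpc c2 hc2h hch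
          · by_cases hc2p : c2 = p
            · exfalso; omega
            · rw [getD_set_ne h p q _ (by omega), getD_set_ne h p c2 _ (by omega)]
              exact hh q c2 hq hc2h hch hqp hc2p
        have hni' : ∀ c2, c2 < (h.set p (h.getD p' 0)).length → (c2 = 2*p'+1 ∨ c2 = 2*p'+2) →
            newitem ≤ (h.set p (h.getD p' 0)).getD c2 0 := by
          intro c2 hc2len hch
          have hc2h : c2 < h.length := by simpa using hc2len
          by_cases hc2p : c2 = p
          · subst hc2p
            rw [getD_set_self h c2 hp]
            omega
          · rw [getD_set_ne h p c2 _ (by omega)]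
            exact le_trans (le_of_lt hmove) (hh p' c2 hkp' hc2h hch (by omega) hc2p)
        have hgp' : k < p' → ∀ c2, c2 < (h.set p (h.getD p' 0)).length →
            (c2 = 2*p'+1 ∨ c2 = 2*p'+2) →
            (h.set p (h.getD p' 0)).getD ((p'-1)/2) 0 ≤ (h.set p (h.getD p' 0)).getD c2 0 := by
          intro hkp'' c2 hc2len hch
          have hc2h : c2 < h.length := by simpa using hc2len
          have hkgp : k ≤ (p'-1)/2 := pvDesc_le (pvDesc_parent hdesc' (by omega))
          rw [getD_set_ne h p ((p'-1)/2) _ (by omega)]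
          by_cases hc2p : c2 = p
          · subst hc2p
            rw [getD_set_self h c2 hp]
            exact hh ((p'-1)/2) p' hkgp hp'h (by omega) (by omega) (by omega)
          · rw [getD_set_ne h p c2 _ (by omega)]
            exact le_trans (hh ((p'-1)/2) p' hkgp hp'h (by omega) (by omega) (by omega))
              (hh p' c2 hkp' hc2h hch (by omega) hc2p)
        obtain ⟨h1, p1, heq, hlen1, hp1, hperm1, hheap1⟩ :=
          ih (h.set p (h.getD p' 0)) p' (by omega) (by simpa using hp'h) hdesc' hh' hni' hgp'
        refine ⟨h1, p1, heq, by simpa using hlen1, by simpa using hp1,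
          fun x => (hperm1 x).trans (set_set_perm h p p' hp hp'h (by omega) x), hheap1⟩
      · rw [if_neg hmove]
        refine ⟨h, p, rfl, rfl, hp, fun x => List.Perm.refl _, ?_⟩
        intro q c2 hq hc2len hch
        have hc2h : c2 < h.length := by simpa using hc2len
        by_cases hqp : q = p
        · subst hqp
          rw [getD_set_self h q hp, getD_set_ne h q c2 _ (by omega)]
          exact hni c2 hc2h hch
        · by_cases hc2p : c2 = p
          · subst hc2p
            have hqpar : q = (c2-1)/2 := by omega
            rw [getD_set_ne h c2 q _ (by omega), getD_set_self h c2 hp, hqpar]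
            omega
          · rw [getD_set_ne h p q _ (by omega), getD_set_ne h p c2 _ (by omega)]
            exact hh q c2 hq hc2h hch hqp hc2p
    · rw [if_neg hguard]
      have hpk : p = k := by omega
      subst hpk
      refine ⟨h, p, rfl, rfl, hp, fun x => List.Perm.refl _, ?_⟩
      intro q c2 hq hc2len hch
      have hc2h : c2 < h.length := by simpa using hc2len
      by_cases hqp : q = p
      · subst hqp
        rw [getD_set_self h q hp, getD_set_ne h q c2 _ (by omega)]
        exact hni c2 hc2h hch
      · have hc2p : c2 ≠ p := by omega
        rw [getD_set_ne h p q _ (by omega), getD_set_ne h p c2 _ (by omega)]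
        exact hh q c2 hq hc2h hch hqp hc2p

theorem siftup_spec (h : List Int) (k : Nat) (hk : k < h.length) (hh : HoleHeap h k k) :
    (pvSiftup h k).length = h.length ∧ (pvSiftup h k).Perm h ∧ IsHeapFrom (pvSiftup h k) k := by
  obtain ⟨h1, p1, heq, hlen1, hp1, hd1, hleaf1, hperm1, hh1, hgp1⟩ :=
    siftupLoop_spec k h.length h k h.length rfl (by omega) hk (by rw [pvDesc]; simp) hh
      (fun hkk => absurd hkk (lt_irrefl _))
  set ni := h.getD k 0 with hni
  have hp1l : p1 < h1.length := by omega
  have hh2 : HoleHeap (h1.set p1 ni) k p1 := by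
    intro q c2 hq hc2len hch hqne hcne
    rw [getD_set_ne h1 p1 q _ (by omega), getD_set_ne h1 p1 c2 _ (by omega)]
    exact hh1 q c2 hq (by simpa using hc2len) hch hqne hcne
  have hni2 : ∀ c2, c2 < (h1.set p1 ni).length → (c2 = 2*p1+1 ∨ c2 = 2*p1+2) →
      ni ≤ (h1.set p1 ni).getD c2 0 := by
    intro c2 hc2len hch
    simp only [List.length_set] at hc2len
    omega
  have hgp2 : k < p1 → ∀ c2, c2 < (h1.set p1 ni).length → (c2 = 2*p1+1 ∨ c2 = 2*p1+2) →
      (h1.set p1 ni).getD ((p1-1)/2) 0 ≤ (h1.set p1 ni).getD c2 0 := by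
    intro _ c2 hc2len hch
    simp only [List.length_set] at hc2len
    omega
  obtain ⟨h3, p3, heq2, hlen3, hp3, hperm3, hheap3⟩ :=
    siftdownLoop_spec k ni p1 (h1.set p1 ni) p1 le_rfl (by simpa using hp1l) hd1 hh2 hni2 hgp2
  have hresult : pvSiftup h k = h3.set p3 ni := by
    unfold pvSiftup pvSiftdown
    rw [heq]
    simp only
    rw [getD_set_self h1 p1 hp1l ni, heq2]
  have hset : (h1.set p1 ni).set p1 ni = h1.set p1 ni := List.set_set ..
  refine ⟨?_, ?_, ?_⟩
  · rw [hresult]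
    simp only [List.length_set] at hlen3 ⊢
    omega
  · rw [hresult]
    have p3' := hperm3 ni
    rw [hset] at p3'
    have p1' := hperm1 ni
    have hver : h.set k ni = h := by
      rw [hni, getD_of_lt h k hk]
      exact List.set_getElem_self hk
    rw [hver] at p1'
    exact (p3'.trans p1')
  · rw [hresult]
    exact hheap3

theorem heapify_aux : ∀ (m : Nat) (h : List Int), m ≤ h.length / 2 → IsHeapFrom h m →
    (((List.range m).reverse).foldl (fun h i => pvSiftup h i) h).length = h.length ∧
    (((List.range m).reverse).foldl (fun h i => pvSiftup h i) h).Perm h ∧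
    IsHeapFrom (((List.range m).reverse).foldl (fun h i => pvSiftup h i) h) 0 := by
  intro m
  induction m with
  | zero =>
    intro h _ hh
    exact ⟨by simp, by simp, by simpa using hh⟩
  | succ m ih =>
    intro h hm hh
    rw [List.range_succ, List.reverse_append, List.reverse_singleton, List.singleton_append,
      List.foldl_cons]
    have hmlt : m < h.length := by omega
    have hhole : HoleHeap h m m := by
      intro q c2 hq hc2 hch hqne _
      exact hh q c2 (by omega) hc2 hch
    obtain ⟨hlen, hperm, hheap⟩ := siftup_spec h m hmlt hhole
    obtain ⟨hlen2, hperm2, hheap2⟩ := ih (pvSiftup h m) (by omega) hheap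
    exact ⟨by omega, hperm2.trans hperm, hheap2⟩

theorem heapify_spec (lst : List Int) :
    (pvHeapify lst).length = lst.length ∧ (pvHeapify lst).Perm lst ∧ IsHeapFrom (pvHeapify lst) 0 := by
  unfold pvHeapify
  exact heapify_aux (lst.length / 2) lst le_rfl (by
    intro q c2 hq hc2 hch
    omega)

theorem heap_root_min (h : List Int) (hh : IsHeapFrom h 0) :
    ∀ i, i < h.length → h.getD 0 0 ≤ h.getD i 0 := by
  intro i
  induction i using Nat.strong_induction_on with
  | _ i ih =>
    intro hi
    rcases Nat.eq_zero_or_pos i with h0 | h0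
    · subst h0; exact le_refl _
    · have hpar := hh ((i-1)/2) i (Nat.zero_le _) hi (by omega)
      exact le_trans (ih ((i-1)/2) (by omega) (by omega)) hpar

theorem heappop_spec (h : List Int) (hne : h ≠ []) (hh : IsHeapFrom h 0) :
    (pvHeappop h).1 = h.getD 0 0 ∧ (pvHeappop h).2.length = h.length - 1 ∧
    ((pvHeappop h).1 :: (pvHeappop h).2).Perm h ∧ IsHeapFrom (pvHeappop h).2 0 := by
  by_cases hres : h.dropLast.isEmpty
  · have hdl : h.dropLast = [] := List.isEmpty_iff.mp hres
    have hl := congrArg List.length hdl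
    simp only [List.length_dropLast, List.length_nil] at hl
    have hne0 : h.length ≠ 0 := fun e => hne (List.length_eq_zero_iff.mp e)
    obtain ⟨x, hx⟩ := (List.length_eq_one_iff (l := h)).mp (by omega)
    subst hx
    refine ⟨rfl, rfl, by exact List.Perm.refl _, ?_⟩
    intro q c2 hq hc2 hch
    simp [pvHeappop] at hc2
  · have hrne : h.dropLast ≠ [] := fun e => by simp [e] at hres
    have h0l : 0 < h.dropLast.length := List.length_pos_iff.mpr hrne
    have hlen2 : 2 ≤ h.length := by
      simp only [List.length_dropLast] at h0l; omega
    set last := h.getLast?.getD 0 with hlast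
    have hgetrest : ∀ q, q < h.dropLast.length → h.dropLast.getD q 0 = h.getD q 0 := by
      intro q hq
      rw [getD_of_lt _ q hq, getD_of_lt h q (by simp only [List.length_dropLast] at hq; omega)]
      exact List.getElem_dropLast hq
    have hhole : HoleHeap (h.dropLast.set 0 last) 0 0 := by
      intro q c2 hq hc2len hch hqne hcne
      simp only [List.length_set] at hc2len
      rw [getD_set_ne _ 0 q _ (by omega), getD_set_ne _ 0 c2 _ (by omega),
          hgetrest q (by omega), hgetrest c2 hc2len]
      exact hh q c2 (by omega) (by simp at hc2len ⊢; omega) hch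
    obtain ⟨hlenS, hpermS, hheapS⟩ := siftup_spec (h.dropLast.set 0 last) 0 (by simp only [List.length_set]; exact h0l) hhole
    have hchar : pvHeappop h = (h.dropLast.getD 0 0, pvSiftup (h.dropLast.set 0 last) 0) := by
      simp only [pvHeappop, hres]
      rfl
    rw [hchar]
    refine ⟨hgetrest 0 h0l, ?_, ?_, hheapS⟩
    · simp only [List.length_set, List.length_dropLast] at hlenS ⊢
      omega
    · -- permutation
      rcases hd : h.dropLast with _ | ⟨r0, rt⟩
      · exact absurd hd hrne
      · show (r0 :: pvSiftup ((r0 :: rt).set 0 last) 0).Perm h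
        rw [hd] at hpermS
        have hperm1 : (r0 :: pvSiftup ((r0 :: rt).set 0 last) 0).Perm (r0 :: last :: rt) :=
          (hpermS.trans (by rfl)).cons r0
        have hlastval : last = h.getLast hne := by
          rw [hlast, List.getLast?_eq_some_getLast hne]; rfl
        have hdecomp : (r0 :: rt) ++ [last] = h := by
          rw [hlastval, ← hd]
          exact List.dropLast_append_getLast hne
        refine hperm1.trans ?_
        refine List.Perm.trans ?_ (by rw [hdecomp] : ((r0 :: rt) ++ [last]).Perm h)
        exact ((List.perm_append_singleton last rt).symm).cons r0

theorem pops_spec (n : Nat) : ∀ (h : List Int), h.length = n → IsHeapFrom h 0 →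
    (pvPops h n).Perm h ∧ (pvPops h n).Pairwise (· ≤ ·) := by
  induction n with
  | zero =>
    intro h hlen _
    rw [List.length_eq_zero_iff.mp hlen]
    exact ⟨List.Perm.refl _, List.Pairwise.nil⟩
  | succ n ih =>
    intro h hlen hh
    have hne : h ≠ [] := fun e => by simp [e] at hlen
    obtain ⟨hx, hlen', hperm, hheap⟩ := heappop_spec h hne hh
    obtain ⟨ihp, ihpw⟩ := ih (pvHeappop h).2 (by omega) hheap
    rw [show pvPops h (n+1) = (pvHeappop h).1 :: pvPops (pvHeappop h).2 n from rfl]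
    constructor
    · exact (ihp.cons _).trans hperm
    · rw [List.pairwise_cons]
      refine ⟨?_, ihpw⟩
      intro y hy
      have hyh : y ∈ h := hperm.subset (List.mem_cons_of_mem _ (ihp.subset hy))
      obtain ⟨i, hi, hieq⟩ := List.mem_iff_getElem.mp hyh
      rw [hx, ← hieq, ← getD_of_lt h i hi]
      exact heap_root_min h hh i hi

theorem bisStep_spec (b : List Int) (i : Nat) (hi : i < b.length)
    (hsort : (b.take i).Pairwise (· ≤ ·)) :
    (pvBisStep b i).length = b.length ∧ (pvBisStep b i).Perm b ∧
    ((pvBisStep b i).take (i+1)).Pairwise (· ≤ ·) := by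
  set x := b[i] with hx
  set P := b.take i with hP
  set D := b.drop (i+1) with hD
  have hPlen : P.length = i := by rw [hP]; simp; omega
  have hDlen : D.length = b.length - (i+1) := by rw [hD]; simp
  have hE : b.eraseIdx i = P ++ D := List.eraseIdx_eq_take_drop_succ b i
  have hElen : (b.eraseIdx i).length = b.length - 1 := by
    rw [List.length_eraseIdx, if_pos hi]
  have hEtake : (b.eraseIdx i).take i = P := by
    rw [hE, List.take_append, List.take_of_length_le (by omega), hPlen]
    simp
  obtain ⟨hjle, hlow, hhigh⟩ := PySem.List.bisectRight_spec P x hsort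
  set j := PySem.List.bisectRight P x with hj
  have hjle' : j ≤ i := by omega
  have hchar : pvBisStep b i = (b.eraseIdx i).take j ++ x :: (b.eraseIdx i).drop j := by
    unfold pvBisStep
    rw [PySem.List.pop?_natCast b i hi]
    simp only [Option.getD_some]
    rw [hEtake, ← hj, ← hx, PySem.List.insert_natCast _ j x (by rw [hElen]; omega)]
  have hEtakej : (b.eraseIdx i).take j = P.take j := by
    rw [hE, List.take_append]
    have hz : j - P.length = 0 := by omega
    rw [hz]
    simp
  have hEdropj : (b.eraseIdx i).drop j = P.drop j ++ D := by
    rw [hE, List.drop_append_of_le_length (by omega)]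
  have hb : P ++ x :: D = b := by
    rw [hx, hP, hD, ← List.drop_eq_getElem_cons hi]
    exact List.take_append_drop i b
  refine ⟨?_, ?_, ?_⟩
  · rw [hchar, hEtakej, hEdropj]
    simp only [List.length_append, List.length_take, List.length_cons, List.length_drop]
    omega
  · rw [hchar, hEtakej, hEdropj]
    refine List.perm_middle.trans ?_
    have : P.take j ++ (P.drop j ++ D) = P ++ D := by
      rw [← List.append_assoc, List.take_append_drop]
    rw [this]
    have hb' : (P ++ x :: D).Perm b := by rw [hb]
    exact List.perm_middle.symm.trans hb'
  · rw [hchar, hEtakej, hEdropj]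
    have hPtj : (P.take j).length = j := by simp only [List.length_take, hPlen]; omega
    have hPdj : (P.drop j).length = i - j := by simp only [List.length_drop, hPlen]
    have htake : (P.take j ++ x :: (P.drop j ++ D)).take (i+1)
        = P.take j ++ x :: P.drop j := by
      rw [List.take_append]
      have hA : List.take (i+1) (P.take j) = P.take j :=
        List.take_of_length_le (by rw [hPtj]; omega)
      have h1 : i + 1 - (P.take j).length = (i - j) + 1 := by rw [hPtj]; omega
      rw [hA, h1, List.take_succ_cons, List.take_append]
      have hB : List.take (i-j) (P.drop j) = P.drop j :=
        List.take_of_length_le (le_of_eq hPdj)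
      have h2 : i - j - (P.drop j).length = 0 := by rw [hPdj]; omega
      rw [hB, h2, List.take_zero, List.append_nil]
    rw [htake]
    rw [List.pairwise_append]
    refine ⟨List.Pairwise.sublist (List.take_sublist j P) hsort, ?_, ?_⟩
    · rw [List.pairwise_cons]
      refine ⟨?_, List.Pairwise.sublist (List.drop_sublist j P) hsort⟩
      intro y hy
      obtain ⟨t, ht, hteq⟩ := List.mem_iff_getElem.mp hy
      rw [← hteq, List.getElem_drop]
      exact le_of_lt (hhigh (j + t) (by omega) (by omega))
    · intro a ha y hy
      obtain ⟨t, ht, hteq⟩ := List.mem_iff_getElem.mp ha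
      have htj : t < j := by
        have := ht; simp only [List.length_take] at this; omega
      rw [← hteq, List.getElem_take]
      rcases List.mem_cons.mp hy with hyx | hyd
      · subst hyx
        exact hlow t (by omega) htj
      · obtain ⟨u, hu, hueq⟩ := List.mem_iff_getElem.mp hyd
        rw [← hueq, List.getElem_drop]
        exact List.pairwise_iff_getElem.mp hsort t (j + u) (by omega) (by omega) (by omega)

theorem bis_aux : ∀ (cnt i : Nat) (b : List Int), 1 ≤ i → i + cnt = b.length →
    (b.take i).Pairwise (· ≤ ·) →
    ((List.range' i cnt).foldl pvBisStep b).length = b.length ∧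
    ((List.range' i cnt).foldl pvBisStep b).Perm b ∧
    (((List.range' i cnt).foldl pvBisStep b).take (i + cnt)).Pairwise (· ≤ ·) := by
  intro cnt
  induction cnt with
  | zero =>
    intro i b _ _ hsort
    exact ⟨by simp, by simp, by simpa using hsort⟩
  | succ cnt ih =>
    intro i b h1 hlen hsort
    rw [List.range'_succ, List.foldl_cons]
    obtain ⟨hlenS, hpermS, hsortS⟩ := bisStep_spec b i (by omega) hsort
    obtain ⟨hlen2, hperm2, hsort2⟩ := ih (i+1) (pvBisStep b i) (by omega) (by omega) hsortS
    refine ⟨by omega, hperm2.trans hpermS, ?_⟩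
    have : i + (cnt + 1) = (i + 1) + cnt := by omega
    rw [this]
    exact hsort2

theorem bis_spec (arr : List Int) :
    (pvBinaryInsertionSort arr).Perm arr ∧ (pvBinaryInsertionSort arr).Pairwise (· ≤ ·) := by
  unfold pvBinaryInsertionSort
  by_cases hlen0 : arr.length = 0
  · rw [List.length_eq_zero_iff.mp hlen0]
    simp
  · have hsort1 : (arr.take 1).Pairwise (· ≤ ·) := by
      rw [List.pairwise_iff_getElem]
      intro t u ht hu htu
      simp only [List.length_take] at ht hu
      omega
    obtain ⟨hlenA, hpermA, hsortA⟩ := bis_aux (arr.length - 1) 1 arr le_rfl (by omega) hsort1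
    refine ⟨hpermA, ?_⟩
    have h1 : 1 + (arr.length - 1) = arr.length := by omega
    rw [h1] at hsortA
    rwa [List.take_of_length_le (by omega)] at hsortA

theorem sorted_branch (lst : List Int) :
    (if (pvHeapify lst).length < 10 then pvBinaryInsertionSort (pvHeapify lst)
     else pvPops (pvHeapify lst) (pvHeapify lst).length) = PySem.List.sorted lst (fun x => x) := by
  by_cases hlen : (pvHeapify lst).length < 10
  · rw [if_pos hlen]
    obtain ⟨hperm, hpw⟩ := bis_spec (pvHeapify lst)
    exact Eq.symm <| PySem.List.sorted_id_eq_of_perm_of_pairwise _ _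
      (hperm.trans (heapify_spec lst).2.1) hpw
  · rw [if_neg hlen]
    obtain ⟨hperm, hpw⟩ := pops_spec (pvHeapify lst).length (pvHeapify lst) rfl (heapify_spec lst).2.2
    exact Eq.symm <| PySem.List.sorted_id_eq_of_perm_of_pairwise _ _
      (hperm.trans (heapify_spec lst).2.1) hpw

-- ===== VERDICT (by name: the statement is the Claim_ definition above) =====
theorem hybrid_sort_list_heap_spec : Claim_equal_hybrid_sort_list_heap := by
  intro lst _
  unfold Spec_hybrid_sort_list_heap
  show pvInterleave _ [] = _
  rw [sorted_branch lst]
  show _ = pvTwoPtr _ [] 0 _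
  set s := PySem.List.sorted lst (fun x => x) with hs
  rw [pvInterleave_eq_weave s.length s [] le_rfl, List.nil_append]
  rw [PySem.List.len_eq]
  by_cases hemp : s = []
  · rw [hemp, pvTwoPtr, pvWeave]
    norm_num
  · have hone : 1 ≤ s.length := by
      rcases s with _ | _
      · exact absurd rfl hemp
      · simp
    rw [pvTwoPtr_eq_weave s.length s [] 0 ((s.length : Int) - 1) (by omega) (by omega)
        (by omega) (by omega), List.nil_append]
    have h1 : ((s.length : Int) - 1 + 1 - 0).toNat = s.length := by omega
    rw [h1]
    simp
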